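-- pv_equiv track=rewrite | github.com/YI-Pengfei/HandyTools | IEEE缩写替换/IEEE缩写替换.py | deel_month
-- ===== SOURCE A (Python) =====
-- def deel_month(line):
--     """月份缩写"""
--     month={'January':'Jan.',
--         'February':'Feb.',
--         'March':'Mar.',
--         'April':'Apr.',
--         'May':'May',
--         'June':'Jun.',
--         'July':'Jul.',
--         'August':'Aug.',
--         'September':'Sep.',
--         'October':'Oct.',
--         'November':'Nov.',
--         'December':'Dec.'}
--     for k in month:
--         line = line.replace(k,month[k])
--     return line
-- ===== SOURCE B (Python) =====
-- def deel_month(line):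
--     """月份缩写 — single left-to-right pass instead of twelve sequential full-string scans"""
--     month = {'January': 'Jan.',
--              'February': 'Feb.',
--              'March': 'Mar.',
--              'April': 'Apr.',
--              'May': 'May',
--              'June': 'Jun.',
--              'July': 'Jul.',
--              'August': 'Aug.',
--              'September': 'Sep.',
--              'October': 'Oct.',
--              'November': 'Nov.',
--              'December': 'Dec.'}
--     out = []
--     i = 0
--     n = len(line)
--     while i < n:
--         for k, v in month.items():
--             if line.startswith(k, i):
--                 out.append(v)
--                 i += len(k)
--                 break
--         else:
--             out.append(line[i])
--             i += 1
--     return ''.join(out)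
-- ===== Notes on version B (the rewrite author's own statement) =====
-- stated objective: alternative
-- what changed: A runs twelve sequential full-string str.replace scans (one per month); B makes a single left-to-right pass over the line, trying the twelve month names at each position and emitting either the abbreviation or the character.
import Mathlib
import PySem

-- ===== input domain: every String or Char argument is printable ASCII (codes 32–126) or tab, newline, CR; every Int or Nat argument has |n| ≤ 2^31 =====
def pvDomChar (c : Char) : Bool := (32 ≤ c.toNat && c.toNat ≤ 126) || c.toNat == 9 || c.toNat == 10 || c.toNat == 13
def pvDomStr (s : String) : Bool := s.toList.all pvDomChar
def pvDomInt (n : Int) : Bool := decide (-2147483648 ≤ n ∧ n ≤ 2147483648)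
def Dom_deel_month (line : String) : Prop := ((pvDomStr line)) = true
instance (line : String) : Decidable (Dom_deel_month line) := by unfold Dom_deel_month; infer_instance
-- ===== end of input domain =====

-- B replaces A's twelve sequential full-string `str.replace` scans by a single left-to-right
-- pass over the string (objective: alternative single-pass algorithm, same result).

-- ===== PORT A =====
-- the dict literal `month`
def pvMonthDict : PySem.Dict String String :=
  PySem.Dict.ofList
    [("January", "Jan."), ("February", "Feb."), ("March", "Mar."), ("April", "Apr."),
     ("May", "May"), ("June", "Jun."), ("July", "Jul."), ("August", "Aug."),
     ("September", "Sep."), ("October", "Oct."), ("November", "Nov."), ("December", "Dec.")]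

-- `for k in month: line = line.replace(k, month[k])`
def deel_month (line : String) : String :=
  pvMonthDict.items.foldl (fun l p => PySem.Str.replace l p.1 p.2) line

-- ===== PORT B =====
-- the same pairs, as B's dict (iterated in insertion order by the inner for loop)
def pvMonthPairs : List (String × String) :=
  [("January", "Jan."), ("February", "Feb."), ("March", "Mar."), ("April", "Apr."),
   ("May", "May"), ("June", "Jun."), ("July", "Jul."), ("August", "Aug."),
   ("September", "Sep."), ("October", "Oct."), ("November", "Nov."), ("December", "Dec.")]

-- char-level table, keys/values as char lists
def pvTbl : List (List Char × List Char) :=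
  pvMonthPairs.map (fun p => (p.1.toList, p.2.toList))

-- B's while loop over the remaining suffix of the line: at each position try the twelve
-- months in order (the inner for/else); on a match emit the abbreviation and skip the
-- month, else emit the character and advance by one.
def pvScan : List Char → List Char
  | [] => []
  | c :: t =>
    match pvTbl.find? (fun p => p.1.isPrefixOf (c :: t)) with
    | some (k, _v) => _v ++ pvScan (t.drop (k.length - 1))
    | none => c :: pvScan t
termination_by s => s.length
decreasing_by all_goals (simp only [List.length_drop, List.length_cons]; omega)

def deel_month_alt (line : String) : String :=
  String.ofList (pvScan line.toList)

-- ===== PRECONDITION & SPEC =====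
def Spec_deel_month (line : String) (out : String) : Prop := out = deel_month_alt line
instance (line : String) (out : String) : Decidable (Spec_deel_month line out) := by unfold Spec_deel_month; infer_instance

-- ===== CLAIM (what is proved, stated in full; the proofs are below) =====
def Claim_equal_deel_month : Prop := ∀ (line : String), Dom_deel_month line → Spec_deel_month line (deel_month line)

-- ===== LEMMAS AND PROOFS =====

-- an ASCII upper-case letter (every abbreviation starts with one; no month name has one past its head)
def pvIsUp (c : Char) : Bool := 'A' ≤ c && c ≤ 'Z'

-- `pvC p k`: the pattern k mismatches p at every start position inside p (so k never begins inside p)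
def pvC (p k : List Char) : Prop :=
  ∀ i < p.length, ∃ d < k.length, i + d < p.length ∧ p[i + d]? ≠ k[d]?

-- A's chain of replaces, at char level
def pvFoldRep (ts : List (List Char × List Char)) (s : List Char) : List Char :=
  ts.foldl (fun l q => PySem.Chars.replace l q.1 q.2) s

-- ---- basic facts about PySem.Chars.replace (via its fuelled worker `go`) ----

theorem pv_go_nil (old new : List Char) (fuel : Nat) (acc : List Char) :
    PySem.Chars.replace.go old new fuel [] acc = acc.reverse := by
  cases fuel with
  | zero => rw [PySem.Chars.replace.go.eq_def]; simp
  | succ f => rw [PySem.Chars.replace.go.eq_def]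

theorem pv_go_acc (old new : List Char) (fuel : Nat) (l acc : List Char) :
    PySem.Chars.replace.go old new fuel l acc = acc.reverse ++ PySem.Chars.replace.go old new fuel l [] := by
  induction fuel generalizing l acc with
  | zero => rw [PySem.Chars.replace.go.eq_def, PySem.Chars.replace.go.eq_def]; simp
  | succ f ih =>
    cases l with
    | nil => rw [pv_go_nil, pv_go_nil]; simp
    | cons c t =>
      rw [PySem.Chars.replace.go.eq_def old new (f + 1) (c :: t) acc,
          PySem.Chars.replace.go.eq_def old new (f + 1) (c :: t) []]
      simp only []
      split_ifs with h
      · rw [ih (List.drop old.length (c :: t)) (new.reverse ++ acc),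
            ih (List.drop old.length (c :: t)) (new.reverse ++ [])]
        simp
      · rw [ih t (c :: acc), ih t [c]]
        simp

theorem pv_go_fuel (old new : List Char) (hold : old ≠ []) (f₁ f₂ : Nat) (l acc : List Char)
    (h1 : l.length ≤ f₁) (h2 : l.length ≤ f₂) :
    PySem.Chars.replace.go old new f₁ l acc = PySem.Chars.replace.go old new f₂ l acc := by
  induction f₁ generalizing f₂ l acc with
  | zero =>
    have hl : l = [] := by
      cases l with
      | nil => rfl
      | cons a b => simp at h1
    subst hl; rw [pv_go_nil, pv_go_nil]
  | succ f ih =>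
    cases l with
    | nil => rw [pv_go_nil, pv_go_nil]
    | cons c t =>
      cases f₂ with
      | zero => simp at h2
      | succ f₂' =>
        rw [PySem.Chars.replace.go.eq_def old new (f + 1) (c :: t) acc,
            PySem.Chars.replace.go.eq_def old new (f₂' + 1) (c :: t) acc]
        simp only []
        have hol : 1 ≤ old.length := by
          cases old with
          | nil => exact absurd rfl hold
          | cons a b => simp
        split_ifs with hq
        · exact ih f₂' (List.drop old.length (c :: t)) _
            (by simp at h1 ⊢; omega) (by simp at h2 ⊢; omega)
        · exact ih f₂' t _ (by simp at h1 ⊢; omega) (by simp at h2 ⊢; omega)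

theorem pv_replace_nil (old new : List Char) (hold : old ≠ []) :
    PySem.Chars.replace [] old new = [] := by
  rw [PySem.Chars.replace]
  simp [hold, pv_go_nil]

theorem pv_replace_no_match (old new : List Char) (c : Char) (t : List Char)
    (hp : old.isPrefixOf (c :: t) = false) :
    PySem.Chars.replace (c :: t) old new = c :: PySem.Chars.replace t old new := by
  have hold : old ≠ [] := by
    intro h; subst h; simp [List.isPrefixOf] at hp
  rw [PySem.Chars.replace, PySem.Chars.replace]
  simp only [List.isEmpty_iff, hold, List.length_cons]
  rw [PySem.Chars.replace.go.eq_def]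
  simp only [hp]
  rw [pv_go_acc old new t.length t [c]]
  simp

theorem pv_replace_match (old new l : List Char) (hold : old ≠ [])
    (hp : old.isPrefixOf l = true) :
    PySem.Chars.replace l old new = new ++ PySem.Chars.replace (l.drop old.length) old new := by
  cases l with
  | nil =>
    exact absurd (List.prefix_nil.mp (List.isPrefixOf_iff_prefix.mp hp)) hold
  | cons c t =>
    have hol : 1 ≤ old.length := by
      cases old with
      | nil => exact absurd rfl hold
      | cons a b => simp
    rw [PySem.Chars.replace, PySem.Chars.replace]
    simp only [List.isEmpty_iff, hold]
    rw [PySem.Chars.replace.go.eq_def]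
    simp only [List.length_cons, hp, if_pos]
    rw [pv_go_acc]
    rw [if_neg not_false, if_neg not_false]
    simp only [List.append_nil, List.reverse_reverse]
    congr 1
    exact pv_go_fuel old new hold t.length ((c :: t).drop old.length).length _ []
      (by simp; omega) (le_refl _)

-- ---- pvC: lifting a replace chain over a block it can never match inside ----

theorem pv_C_shift (a : Char) (p' k : List Char) (h : pvC (a :: p') k) : pvC p' k := by
  intro i hi
  obtain ⟨d, hd, hlt, hne⟩ := h (i + 1) (by simp; omega)
  refine ⟨d, hd, by simp at hlt ⊢; omega, ?_⟩
  simpa [show i + 1 + d = (i + d) + 1 by omega] using hne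

theorem pv_not_prefix_of_C (p k x : List Char) (hp : p ≠ []) (h : pvC p k) :
    k.isPrefixOf (p ++ x) = false := by
  by_contra hcon
  have hb : k.isPrefixOf (p ++ x) = true := by
    revert hcon; cases k.isPrefixOf (p ++ x) <;> simp
  obtain ⟨w, hw⟩ := List.isPrefixOf_iff_prefix.mp hb
  have hplen : 0 < p.length := by
    cases p with
    | nil => exact absurd rfl hp
    | cons a b => simp
  obtain ⟨d, hd, hlt, hne⟩ := h 0 hplen
  simp only [Nat.zero_add] at hlt hne
  apply hne
  calc p[d]? = (p ++ x)[d]? := (List.getElem?_append_left hlt).symm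
    _ = (k ++ w)[d]? := by rw [hw]
    _ = k[d]? := List.getElem?_append_left hd

theorem pv_rep_lift (k v p : List Char) (h : pvC p k) :
    ∀ x, PySem.Chars.replace (p ++ x) k v = p ++ PySem.Chars.replace x k v := by
  induction p with
  | nil => intro x; simp
  | cons a p' ih =>
    intro x
    have hnp : k.isPrefixOf ((a :: p') ++ x) = false :=
      pv_not_prefix_of_C (a :: p') k x (by simp) h
    rw [List.cons_append, pv_replace_no_match k v a (p' ++ x) (by simpa using hnp)]
    rw [ih (pv_C_shift a p' k h) x, List.cons_append]

theorem pv_foldRep_lift (ts : List (List Char × List Char)) (p : List Char)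
    (h : ∀ q ∈ ts, pvC p q.1) :
    ∀ x, pvFoldRep ts (p ++ x) = p ++ pvFoldRep ts x := by
  induction ts with
  | nil => intro x; rfl
  | cons q rest ih =>
    intro x
    simp only [pvFoldRep, List.foldl_cons]
    rw [pv_rep_lift q.1 q.2 p (h q (by simp)) x]
    exact ih (fun q' hq' => h q' (by simp [hq'])) (PySem.Chars.replace x q.1 q.2)

theorem pv_foldRep_append_cons (pre post : List (List Char × List Char)) (k v : List Char)
    (s : List Char) :
    pvFoldRep (pre ++ (k, v) :: post) s
      = pvFoldRep post (PySem.Chars.replace (pvFoldRep pre s) k v) := by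
  simp [pvFoldRep, List.foldl_append]

theorem pv_chain_split (pre post : List (List Char × List Char)) (k v : List Char)
    (hk : k ≠ []) (h1 : ∀ q ∈ pre, pvC k q.1) (h2 : ∀ q ∈ post, pvC v q.1) (r : List Char) :
    pvFoldRep (pre ++ (k, v) :: post) (k ++ r) = v ++ pvFoldRep (pre ++ (k, v) :: post) r := by
  rw [pv_foldRep_append_cons, pv_foldRep_append_cons]
  rw [pv_foldRep_lift pre k h1 r]
  rw [pv_replace_match k v (k ++ pvFoldRep pre r) hk
        (List.isPrefixOf_iff_prefix.mpr (List.prefix_append _ _))]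
  rw [List.drop_left]
  exact pv_foldRep_lift post v h2 _

-- ---- the no-match-at-head case: a replace never creates a month start at the head ----

theorem pv_rep_take_eq (k v : List Char) (hk : k ≠ []) (hv1 : (v.take 1).all pvIsUp = true)
    (hv2 : v ≠ []) :
    ∀ m t n, t.length ≤ m →
      ((PySem.Chars.replace t k v).take n).all (fun c => !pvIsUp c) = true →
      (PySem.Chars.replace t k v).take n = t.take n := by
  intro m
  induction m with
  | zero =>
    intro t n ht _
    have : t = [] := by
      cases t with
      | nil => rfl
      | cons a b => simp at ht
    subst this
    rw [pv_replace_nil k v hk]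
  | succ m ih =>
    intro t n ht hall
    cases t with
    | nil => rw [pv_replace_nil k v hk]
    | cons c t' =>
      cases hp : k.isPrefixOf (c :: t') with
      | true =>
        rw [pv_replace_match k v (c :: t') hk hp] at hall ⊢
        cases v with
        | nil => exact absurd rfl hv2
        | cons u v'' =>
          cases n with
          | zero => rfl
          | succ n' =>
            exfalso
            have h1 : pvIsUp u = true := by simpa using hv1
            have h2 : (!pvIsUp u) = true := by
              rw [List.cons_append, List.take_succ_cons, List.all_cons, Bool.and_eq_true] at hall
              exact hall.1
            rw [h1] at h2
            simp at h2
      | false =>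
        rw [pv_replace_no_match k v c t' hp] at hall ⊢
        cases n with
        | zero => rfl
        | succ n' =>
          rw [List.take_succ_cons, List.take_succ_cons]
          rw [List.take_succ_cons, List.all_cons, Bool.and_eq_true] at hall
          exact congrArg (c :: ·) (ih t' n' (by simp at ht; omega) hall.2)

theorem pv_noPrefix_preserved (k v k₂ : List Char) (hk : k ≠ [])
    (hv1 : (v.take 1).all pvIsUp = true) (hv2 : v ≠ [])
    (hk₂ : (k₂.drop 1).all (fun c => !pvIsUp c) = true) (c : Char) (t : List Char)
    (h : k₂.isPrefixOf (c :: t) = false) :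
    k₂.isPrefixOf (c :: PySem.Chars.replace t k v) = false := by
  cases k₂ with
  | nil => simp [List.isPrefixOf] at h
  | cons c₂ u =>
    by_contra hcon
    have hb : (c₂ :: u).isPrefixOf (c :: PySem.Chars.replace t k v) = true := by
      revert hcon; cases (c₂ :: u).isPrefixOf (c :: PySem.Chars.replace t k v) <;> simp
    have hpre := List.isPrefixOf_iff_prefix.mp hb
    rw [List.cons_prefix_cons] at hpre
    obtain ⟨hc, hu⟩ := hpre
    have hue : u = (PySem.Chars.replace t k v).take u.length :=
      List.prefix_iff_eq_take.mp hu
    have hall : ((PySem.Chars.replace t k v).take u.length).all (fun c => !pvIsUp c) = true := by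
      rw [← hue]; simpa using hk₂
    have ht := pv_rep_take_eq k v hk hv1 hv2 t.length t u.length (le_refl _) hall
    have hut : u <+: t := by
      rw [hue, ht]; exact List.take_prefix _ _
    have : (c₂ :: u).isPrefixOf (c :: t) = true := by
      rw [List.isPrefixOf_iff_prefix, hc, List.cons_prefix_cons]
      exact ⟨rfl, hut⟩
    rw [this] at h; simp at h

def pvGood (ts : List (List Char × List Char)) : Prop :=
  ∀ q ∈ ts, q.1 ≠ [] ∧ (q.1.drop 1).all (fun c => !pvIsUp c) = true ∧
    (q.2.take 1).all pvIsUp = true ∧ q.2 ≠ []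

theorem pv_foldRep_cons (ts : List (List Char × List Char)) (hgood : pvGood ts)
    (c : Char) :
    ∀ t, (∀ q ∈ ts, q.1.isPrefixOf (c :: t) = false) →
      pvFoldRep ts (c :: t) = c :: pvFoldRep ts t := by
  induction ts with
  | nil => intro t _; rfl
  | cons q rest ih =>
    intro t hnp
    obtain ⟨hk, hktail, hv1, hv2⟩ := hgood q (by simp)
    simp only [pvFoldRep, List.foldl_cons]
    rw [pv_replace_no_match q.1 q.2 c t (hnp q (by simp))]
    have hrest : ∀ q' ∈ rest, q'.1.isPrefixOf (c :: PySem.Chars.replace t q.1 q.2) = false := by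
      intro q' hq'
      exact pv_noPrefix_preserved q.1 q.2 q'.1 hk hv1 hv2
        ((hgood q' (by simp [hq'])).2.1) c t (hnp q' (by simp [hq']))
    exact ih (fun q' hq' => hgood q' (by simp [hq'])) (PySem.Chars.replace t q.1 q.2) hrest

-- ---- facts about the literal table, checked by decide ----

theorem pv_tbl_good : pvGood pvTbl := by unfold pvGood; decide

theorem pv_tbl_split_good : ∀ m < pvTbl.length,
    (∀ q ∈ pvTbl.take m, pvC (pvTbl[m]!.1) q.1) ∧
    (∀ q ∈ pvTbl.drop (m + 1), pvC (pvTbl[m]!.2) q.1) := by unfold pvC; decide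

-- ---- gluing ----

theorem pv_foldRep_nil (ts : List (List Char × List Char)) (h : ∀ q ∈ ts, q.1 ≠ []) :
    pvFoldRep ts [] = [] := by
  induction ts with
  | nil => rfl
  | cons q rest ih =>
    simp only [pvFoldRep, List.foldl_cons]
    rw [pv_replace_nil q.1 q.2 (h q (by simp))]
    exact ih (fun q' hq' => h q' (by simp [hq']))

theorem pv_drop_tail (k r t : List Char) (c : Char) (hk : k ≠ [])
    (hr : k ++ r = c :: t) : t.drop (k.length - 1) = r := by
  cases k with
  | nil => exact absurd rfl hk
  | cons a k' =>
    rw [List.cons_append] at hr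
    injection hr with h1 h2
    subst h2
    simp

theorem pv_scan_cons (c : Char) (t : List Char) :
    pvScan (c :: t) = match pvTbl.find? (fun p => p.1.isPrefixOf (c :: t)) with
      | some (k, _v) => _v ++ pvScan (t.drop (k.length - 1))
      | none => c :: pvScan t := by
  rw [pvScan]

theorem pv_main : ∀ n (s : List Char), s.length ≤ n → pvFoldRep pvTbl s = pvScan s := by
  intro n
  induction n with
  | zero =>
    intro s hs
    have : s = [] := by
      cases s with
      | nil => rfl
      | cons a b => simp at hs
    subst this
    rw [pv_foldRep_nil pvTbl (fun q hq => (pv_tbl_good q hq).1), pvScan]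
  | succ n ih =>
    intro s hs
    cases s with
    | nil => rw [pv_foldRep_nil pvTbl (fun q hq => (pv_tbl_good q hq).1), pvScan]
    | cons c t =>
      cases hfind : pvTbl.find? (fun p => p.1.isPrefixOf (c :: t)) with
      | none =>
        have hnp : ∀ q ∈ pvTbl, q.1.isPrefixOf (c :: t) = false := by
          intro q hq
          have h' := List.find?_eq_none.mp hfind q hq
          cases hb : q.1.isPrefixOf (c :: t) with
          | false => rfl
          | true => exact absurd hb h'
        rw [pv_foldRep_cons pvTbl pv_tbl_good c t hnp]
        rw [pv_scan_cons, hfind]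
        exact congrArg (c :: ·) (ih t (by simp at hs; omega))
      | some p =>
        obtain ⟨k, v⟩ := p
        have hmem : (k, v) ∈ pvTbl := List.mem_of_find?_eq_some hfind
        have hpre : k.isPrefixOf (c :: t) = true := by
          simpa using List.find?_some hfind
        obtain ⟨m, hm, heq⟩ := List.getElem_of_mem hmem
        have hbang : pvTbl[m]! = (k, v) := by rw [getElem!_pos pvTbl m hm, heq]
        have hsplit := pv_tbl_split_good m hm
        rw [hbang] at hsplit
        have htbl : pvTbl = pvTbl.take m ++ (k, v) :: pvTbl.drop (m + 1) := by
          conv_lhs => rw [← List.take_append_drop m pvTbl]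
          rw [List.drop_eq_getElem_cons hm, heq]
        obtain ⟨r, hr⟩ := List.isPrefixOf_iff_prefix.mp hpre
        have hk : k ≠ [] := (pv_tbl_good (k, v) hmem).1
        have hlenr : r.length ≤ n := by
          have h1 : (k ++ r).length = (c :: t).length := by rw [hr]
          have h2 : 1 ≤ k.length := by
            cases k with
            | nil => exact absurd rfl hk
            | cons a b => simp
          simp at h1 hs
          omega
        have hdrop : t.drop (k.length - 1) = r := pv_drop_tail k r t c hk hr
        calc pvFoldRep pvTbl (c :: t) = pvFoldRep pvTbl (k ++ r) := by rw [hr]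
          _ = v ++ pvFoldRep pvTbl r := by
              rw [htbl]; exact pv_chain_split _ _ k v hk hsplit.1 hsplit.2 r
          _ = v ++ pvScan r := by rw [ih r hlenr]
          _ = pvScan (c :: t) := by
              rw [pv_scan_cons, hfind]
              show v ++ pvScan r = v ++ pvScan (t.drop (k.length - 1))
              rw [hdrop]

theorem pv_A_chars : ∀ (ps : List (String × String)) (s : String),
    ps.foldl (fun l p => PySem.Str.replace l p.1 p.2) s
      = String.ofList (pvFoldRep (ps.map (fun p => (p.1.toList, p.2.toList))) s.toList) := by
  intro ps
  induction ps with
  | nil => intro s; simp [pvFoldRep, String.ofList_toList]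
  | cons q rest ih =>
    intro s
    simp only [List.foldl_cons, List.map_cons]
    rw [ih (PySem.Str.replace s q.1 q.2)]
    congr 1
    simp only [pvFoldRep, List.foldl_cons]
    congr 1
    rw [PySem.Str.replace]
    rw [String.toList_ofList]

theorem pv_items : pvMonthDict.items = pvMonthPairs := by decide

-- ===== VERDICT (by name: the statement is the Claim_ definition above) =====
theorem deel_month_spec : Claim_equal_deel_month := by
  intro line _
  unfold Spec_deel_month deel_month deel_month_alt
  rw [pv_items, pv_A_chars pvMonthPairs line]
  rw [show pvMonthPairs.map (fun p => (p.1.toList, p.2.toList)) = pvTbl from rfl]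
  rw [pv_main line.toList.length line.toList (le_refl _)]
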